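-- pv_equiv track=rewrite | github.com/seret1234-dot/weiss-chess-training | bn_manual_sets/bn positions_24-3-2026/bn2/4/scan_only_highlighted_exact_mate_and_bk.py | get_black_king_square_from_fen
-- ===== SOURCE A (Python) =====
-- def get_black_king_square_from_fen(fen):
--     board = fen.split()[0]
--     ranks = board.split("/")
--
--     for r_index, rank in enumerate(ranks):
--         file_index = 0
--         for ch in rank:
--             if ch.isdigit():
--                 file_index += int(ch)
--             else:
--                 if ch == "k":
--                     file_letter = "abcdefgh"[file_index]
--                     rank_number = 8 - r_index
--                     return f"{file_letter}{rank_number}"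
--                 file_index += 1
--     return "unknown"
-- ===== SOURCE B (Python) =====
-- def get_black_king_square_from_fen(fen):
--     board = fen.split()[0]
--     for r_index, rank in enumerate(board.split("/")):
--         expanded = []
--         for ch in rank:
--             expanded.extend("." * int(ch) if ch.isdigit() else ch)
--         if "k" in expanded:
--             pos = expanded.index("k")
--             return "abcdefgh"[pos] + str(8 - r_index)
--     return "unknown"
-- ===== Notes on version B (the rewrite author's own statement) =====
-- stated objective: simpler
-- what changed: B replaces A's per-character file_index accumulator and in-loop branching with an expand-then-search decomposition: each rank is expanded to a full-width placeholder list (digits become runs of dots), and the king's file is just the list index of the king character in that expansion.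
import Mathlib
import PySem

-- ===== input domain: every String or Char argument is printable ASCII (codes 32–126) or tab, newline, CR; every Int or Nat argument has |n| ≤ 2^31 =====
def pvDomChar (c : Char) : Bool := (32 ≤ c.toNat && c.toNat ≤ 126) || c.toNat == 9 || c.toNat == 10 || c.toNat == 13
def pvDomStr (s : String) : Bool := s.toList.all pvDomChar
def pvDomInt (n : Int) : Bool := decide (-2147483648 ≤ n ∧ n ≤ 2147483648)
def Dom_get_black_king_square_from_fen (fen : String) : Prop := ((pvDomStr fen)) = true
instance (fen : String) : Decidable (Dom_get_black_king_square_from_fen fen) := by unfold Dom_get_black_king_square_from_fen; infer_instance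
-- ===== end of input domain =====

set_option maxHeartbeats 1000000


-- B changes the decomposition (expand each rank to full width, then search for 'k') rather than
-- keeping A's running file_index accumulator; objective: simpler. Same return value on Pre_.

-- ===== PORT A =====
-- inner 'for ch in rank' loop: file_index accumulator; returns the square on the first 'k'
def pvAInner : List Char → Nat → Nat → Option String
  | [], _, _ => none
  | c :: rest, fileIndex, rIndex =>
    if PySem.Chars.isdigit c then
      pvAInner rest (fileIndex + (c.toNat - 48)) rIndex
    else if c = 'k' then
      match PySem.List.pyGet? "abcdefgh".toList (fileIndex : Int) with
      | some fl => some (String.ofList [fl] ++ PySem.Int.toStr (8 - (rIndex : Int)))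
      | none => some ""        -- Python raises IndexError here; excluded by Pre_
    else
      pvAInner rest (fileIndex + 1) rIndex

-- outer 'for r_index, rank in enumerate(ranks)' loop with early return
def pvAOuter : List String → Nat → String
  | [], _ => "unknown"
  | rank :: rest, rIndex =>
    match pvAInner rank.toList 0 rIndex with
    | some s => s
    | none => pvAOuter rest (rIndex + 1)

def get_black_king_square_from_fen (fen : String) : String :=
  match PySem.Str.split₀ fen with
  | [] => ""                    -- Python raises IndexError on fen.split()[0]; excluded by Pre_
  | board :: _ => pvAOuter (((PySem.Str.split? board "/").getD [])) 0

-- ===== PORT B =====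
-- expanded rank: digits become runs of '.', other chars kept
def pvBExpand (cs : List Char) : List Char :=
  cs.flatMap (fun c => if PySem.Chars.isdigit c then List.replicate (c.toNat - 48) '.' else [c])

-- loop over ranks: search 'k' in the expanded rank ('"k" in expanded' + 'expanded.index("k")'
-- ported together as PySem.List.index?, which is some iff the membership test succeeds)
def pvBOuter : List String → Nat → String
  | [], _ => "unknown"
  | rank :: rest, rIndex =>
    match PySem.List.index? (pvBExpand rank.toList) 'k' with
    | some pos =>
      match PySem.List.pyGet? "abcdefgh".toList (pos : Int) with
      | some fl => String.ofList [fl] ++ PySem.Int.toStr (8 - (rIndex : Int))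
      | none => ""              -- Python raises IndexError here; excluded by Pre_
    | none => pvBOuter rest (rIndex + 1)

def get_black_king_square_from_fen_alt (fen : String) : String :=
  match PySem.Str.split₀ fen with
  | [] => ""                    -- Python raises IndexError on fen.split()[0]; excluded by Pre_
  | board :: _ => pvBOuter (((PySem.Str.split? board "/").getD [])) 0

-- ===== PRECONDITION & SPEC =====
-- width (in board squares) of a list of FEN rank characters
def pvWidth (cs : List Char) : Nat :=
  (cs.map (fun c => if PySem.Chars.isdigit c then c.toNat - 48 else 1)).sum

-- Pre_ excludes exactly the inputs where Python A raises IndexError: a whitespace-only fen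
-- (fen.split()[0]), or a FEN whose first black king char sits at file index > 7 ("abcdefgh"[file_index]).
-- (B raises on exactly the same inputs.)
def Pre_get_black_king_square_from_fen (fen : String) : Prop :=
  PySem.Str.split₀ fen ≠ [] ∧
  (((PySem.Str.split? ((PySem.Str.split₀ fen).headD "") "/").getD []).find?
      (fun r => r.toList.contains 'k')).all
    (fun rank => pvWidth (rank.toList.takeWhile (fun c => c ≠ 'k')) ≤ 7) = true
instance (fen : String) : Decidable (Pre_get_black_king_square_from_fen fen) := by
  unfold Pre_get_black_king_square_from_fen; infer_instance

def pvWitness_get_black_king_square_from_fen : String :=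
  "rnbqkbnr/pppppppp/8/8/8/8/PPPPPPPP/RNBQKBNR w KQkq - 0 1"

def Spec_get_black_king_square_from_fen (fen : String) (out : String) : Prop := out = get_black_king_square_from_fen_alt fen
instance (fen : String) (out : String) : Decidable (Spec_get_black_king_square_from_fen fen out) := by unfold Spec_get_black_king_square_from_fen; infer_instance

-- ===== CLAIM (what is proved, stated in full; the proofs are below) =====
def Claim_equal_get_black_king_square_from_fen : Prop := ∀ (fen : String), Dom_get_black_king_square_from_fen fen → Pre_get_black_king_square_from_fen fen → Spec_get_black_king_square_from_fen fen (get_black_king_square_from_fen fen)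

-- ===== LEMMAS AND PROOFS =====

-- index of 'k' after a '.'-run shifts by the run's length
theorem pv_index_replicate (v : Nat) (l : List Char) :
    PySem.List.index? (List.replicate v '.' ++ l) 'k'
      = (PySem.List.index? l 'k').map (· + v) := by
  induction v with
  | zero => simp
  | succ n ih =>
    simp only [List.replicate_succ, List.cons_append, PySem.List.index?_eq_idxOf?] at *
    rw [List.idxOf?_cons]
    simp only [show (('.' == 'k') = false) by decide]
    rw [show List.idxOf? 'k' (List.replicate n '.' ++ l) = (List.idxOf? 'k' l).map (· + n) from ih]
    cases List.idxOf? 'k' l <;> simp [Nat.add_assoc]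

-- key lemma: A's inner scan with accumulator fi equals B's expand-then-index on the same rank
theorem pv_inner_eq (cs : List Char) (fi r : Nat) :
    pvAInner cs fi r
      = (PySem.List.index? (pvBExpand cs) 'k').map (fun p =>
          match PySem.List.pyGet? "abcdefgh".toList ((fi + p : Nat) : Int) with
          | some fl => String.ofList [fl] ++ PySem.Int.toStr (8 - (r : Int))
          | none => "") := by
  induction cs generalizing fi with
  | nil => simp [pvAInner, pvBExpand, PySem.List.index?_eq_idxOf?]
  | cons c rest ih =>
    by_cases hd : PySem.Chars.isdigit c
    · rw [show pvAInner (c :: rest) fi r = pvAInner rest (fi + (c.toNat - 48)) r by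
        simp [pvAInner, hd]]
      rw [ih]
      rw [show pvBExpand (c :: rest) = List.replicate (c.toNat - 48) '.' ++ pvBExpand rest by
        simp [pvBExpand, hd]]
      rw [pv_index_replicate]
      cases PySem.List.index? (pvBExpand rest) 'k' with
      | none => simp
      | some p =>
        simp only [Option.map_some]
        rw [show (fi + (c.toNat - 48) + p : Nat) = fi + (p + (c.toNat - 48)) from by omega]
    · by_cases hk : c = 'k'
      · subst hk
        rw [show pvBExpand ('k' :: rest) = 'k' :: pvBExpand rest by simp [pvBExpand, hd]]
        rw [PySem.List.index?_cons_self, Option.map_some, Nat.add_zero]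
        simp only [pvAInner, hd, PySem.List.pyGet?_natCast, Bool.false_eq_true, if_false]
        cases ("abcdefgh".toList)[fi]? <;> rfl
      · rw [show pvAInner (c :: rest) fi r = pvAInner rest (fi + 1) r by
          simp [pvAInner, hd, hk]]
        rw [ih]
        rw [show pvBExpand (c :: rest) = [c] ++ pvBExpand rest by simp [pvBExpand, hd]]
        rw [show PySem.List.index? ([c] ++ pvBExpand rest) 'k'
              = (PySem.List.index? (pvBExpand rest) 'k').map (· + 1) by
          simp only [PySem.List.index?_eq_idxOf?, List.singleton_append]
          rw [List.idxOf?_cons]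
          simp [show (c == 'k') = false by simpa using hk]]
        cases PySem.List.index? (pvBExpand rest) 'k' with
        | none => simp
        | some p =>
          simp only [Option.map_some]
          rw [show (fi + 1 + p : Nat) = fi + (p + 1) from by omega]

theorem pv_outer_eq (ranks : List String) (r : Nat) : pvAOuter ranks r = pvBOuter ranks r := by
  induction ranks generalizing r with
  | nil => rfl
  | cons rank rest ih =>
    simp only [pvAOuter, pvBOuter, pv_inner_eq rank.toList 0 r]
    cases PySem.List.index? (pvBExpand rank.toList) 'k' with
    | none => simp [ih]
    | some p => simp

-- ===== VERDICT (by name: the statement is the Claim_ definition above) =====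
theorem get_black_king_square_from_fen_spec : Claim_equal_get_black_king_square_from_fen := by
  intro fen _ _
  unfold Spec_get_black_king_square_from_fen
  unfold get_black_king_square_from_fen get_black_king_square_from_fen_alt
  cases PySem.Str.split₀ fen with
  | nil => rfl
  | cons board rest => exact pv_outer_eq _ 0
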